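-- pv_equiv track=rewrite | github.com/lzeeorno/396 | extra_ass/extra_ass/subCrack.py | neighborCount
-- ===== SOURCE A (Python) =====
-- alphabet = "abcdefghijklmnopqrstuvwxyz"
--
-- def maybeAdd(ch, neighbors):
--     if ch in alphabet:
--         neighbors[ch] = neighbors.setdefault(ch,0) + 1
--
-- def neighborCount(text):
--     nbDict = {}
--     text = text.lower()
--     for i in range(len(text)-1):
--         ch = text[i]
--         nextch = text[i+1]
--         dict = nbDict.setdefault(ch,{})
--         maybeAdd(nextch,dict)
--         dict = nbDict.setdefault(nextch,{})
--         maybeAdd(ch,dict)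
--     return nbDict
-- ===== SOURCE B (Python) =====
-- alphabet = "abcdefghijklmnopqrstuvwxyz"
--
-- def neighborCount(text):
--     text = text.lower()
--     pairCount = {}
--     for pair in zip(text, text[1:]):
--         pairCount[pair] = pairCount.get(pair, 0) + 1
--     nbDict = {}
--     for (a, b), c in pairCount.items():
--         inner = nbDict.setdefault(a, {})
--         if b in alphabet:
--             inner[b] = inner.get(b, 0) + c
--         inner = nbDict.setdefault(b, {})
--         if a in alphabet:
--             inner[a] = inner.get(a, 0) + c
--     return nbDict
-- ===== Notes on version B (the rewrite author's own statement) =====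
-- stated objective: faster
-- what changed: B replaces A's per-index loop with interleaved setdefault/mutation bookkeeping by first building a pair-frequency table over zip(text, text[1:]) and then making one pass over that table, seeding both endpoints and adding each pair's aggregated count to the letter neighbours.
import Mathlib
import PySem

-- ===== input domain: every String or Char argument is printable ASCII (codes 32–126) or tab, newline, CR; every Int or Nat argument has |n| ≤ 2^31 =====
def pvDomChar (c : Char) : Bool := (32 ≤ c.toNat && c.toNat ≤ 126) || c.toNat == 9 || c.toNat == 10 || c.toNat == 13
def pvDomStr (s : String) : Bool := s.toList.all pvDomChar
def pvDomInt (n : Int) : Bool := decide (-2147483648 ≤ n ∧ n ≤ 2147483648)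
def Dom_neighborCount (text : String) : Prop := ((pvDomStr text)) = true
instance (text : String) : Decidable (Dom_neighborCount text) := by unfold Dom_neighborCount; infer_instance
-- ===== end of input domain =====

-- B replaces A's per-index loop by a pair-frequency table (a dict counter over zip(text, text[1:]))
-- followed by one pass over that table (objective: faster by aggregating duplicate pairs; measured).

-- ===== PORT A =====
def pvAlpha : List Char := "abcdefghijklmnopqrstuvwxyz".toList

-- maybeAdd(ch, neighbors): if ch in alphabet: neighbors[ch] = neighbors.setdefault(ch,0) + 1
def pvMaybeAdd (ch : Char) (neighbors : PySem.Dict Char Int) : PySem.Dict Char Int :=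
  if pvAlpha.contains ch then
    let n1 := neighbors.setdefault ch 0
    n1.insert ch (n1.getD ch 0 + 1)
  else neighbors

-- one iteration of A's loop body, at index i of the lowered text t
def pvStepA (t : List Char) (nb : PySem.Dict Char (PySem.Dict Char Int)) (i : Int) :
    PySem.Dict Char (PySem.Dict Char Int) :=
  match PySem.List.pyGet? t i, PySem.List.pyGet? t (i + 1) with
  | some ch, some nextch =>
      let nb1 := nb.setdefault ch PySem.Dict.empty
      let nb2 := nb1.insert ch (pvMaybeAdd nextch (nb1.getD ch PySem.Dict.empty))
      let nb3 := nb2.setdefault nextch PySem.Dict.empty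
      nb3.insert nextch (pvMaybeAdd ch (nb3.getD nextch PySem.Dict.empty))
  | _, _ => nb  -- unreachable: i and i+1 are in range

def neighborCount (text : String) : List (String × List (String × Int)) :=
  let t := (PySem.Str.lower text).toList
  let nb := (PySem.List.pyRange 0 ((t.length : Int) - 1) 1).foldl (pvStepA t) PySem.Dict.empty
  nb.items.map (fun kv => (kv.1.toString, kv.2.items.map (fun kv2 => (kv2.1.toString, kv2.2))))

-- ===== PORT B =====
-- inner[y] = inner.get(y, 0) + c, when y is a letter
def pvAddC (c : Int) (y : Char) (inner : PySem.Dict Char Int) : PySem.Dict Char Int :=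
  if pvAlpha.contains y then inner.insert y (inner.getD y 0 + c) else inner

-- one iteration of B's second loop, over a pair-count item ((a,b),c)
def pvStepB (nb : PySem.Dict Char (PySem.Dict Char Int)) (e : (Char × Char) × Int) :
    PySem.Dict Char (PySem.Dict Char Int) :=
  let nb1 := nb.setdefault e.1.1 PySem.Dict.empty
  let nb2 := nb1.insert e.1.1 (pvAddC e.2 e.1.2 (nb1.getD e.1.1 PySem.Dict.empty))
  let nb3 := nb2.setdefault e.1.2 PySem.Dict.empty
  nb3.insert e.1.2 (pvAddC e.2 e.1.1 (nb3.getD e.1.2 PySem.Dict.empty))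

def neighborCount_alt (text : String) : List (String × List (String × Int)) :=
  let t := (PySem.Str.lower text).toList
  let pairCount : PySem.Dict (Char × Char) Int :=
    (t.zip (t.drop 1)).foldl (fun d p => d.insert p (d.getD p 0 + 1)) PySem.Dict.empty
  let nb := pairCount.items.foldl pvStepB PySem.Dict.empty
  nb.items.map (fun kv => (kv.1.toString, kv.2.items.map (fun kv2 => (kv2.1.toString, kv2.2))))

-- ===== PRECONDITION & SPEC =====
def Spec_neighborCount (text : String) (out : List (String × List (String × Int))) : Prop := out = neighborCount_alt text
instance (text : String) (out : List (String × List (String × Int))) : Decidable (Spec_neighborCount text out) := by unfold Spec_neighborCount; infer_instance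

-- ===== CLAIM (what is proved, stated in full; the proofs are below) =====
def Claim_equal_neighborCount : Prop := ∀ (text : String), Dom_neighborCount text → Spec_neighborCount text (neighborCount text)

-- ===== LEMMAS AND PROOFS =====

-- the per-pair form of A's loop body
def pvStepP (nb : PySem.Dict Char (PySem.Dict Char Int)) (p : Char × Char) :
    PySem.Dict Char (PySem.Dict Char Int) :=
  let nb1 := nb.setdefault p.1 PySem.Dict.empty
  let nb2 := nb1.insert p.1 (pvMaybeAdd p.2 (nb1.getD p.1 PySem.Dict.empty))
  let nb3 := nb2.setdefault p.2 PySem.Dict.empty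
  nb3.insert p.2 (pvMaybeAdd p.1 (nb3.getD p.2 PySem.Dict.empty))

-- the neighbour events a pair (a,b) generates for the key k, in A's order
def pvEvs (k : Char) (p : Char × Char) : List Char :=
  (if p.1 = k ∧ pvAlpha.contains p.2 then [p.2] else []) ++
  (if p.2 = k ∧ pvAlpha.contains p.1 then [p.1] else [])


-- setdefault at k, then overwrite at k, as a single overwrite
theorem pvSdIns {κ ν : Type} [BEq κ] [LawfulBEq κ] (d : PySem.Dict κ ν) (k : κ) (v0 : ν) (f : ν → ν) :
    (d.setdefault k v0).insert k (f ((d.setdefault k v0).getD k v0)) = d.insert k (f (d.getD k v0)) := by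
  by_cases h : d.contains k
  · rw [PySem.Dict.setdefault_of_contains d v0 h]
  · have h' : d.contains k = false := by simpa using h
    rw [PySem.Dict.setdefault_of_not_contains d v0 h', PySem.Dict.getD_insert_self,
      PySem.Dict.insert_insert_self, PySem.Dict.getD_of_not_contains d v0 h']

theorem pvMaybeAdd_eq (y : Char) (dd : PySem.Dict Char Int) :
    pvMaybeAdd y dd = if pvAlpha.contains y then dd.insert y (dd.getD y 0 + 1) else dd := by
  unfold pvMaybeAdd
  split_ifs with h
  · exact pvSdIns dd y 0 (fun v => v + 1)
  · rfl

theorem pvKeysInsertAdd {κ ν : Type} [BEq κ] [LawfulBEq κ] (d : PySem.Dict κ ν) (k : κ) (v : ν) :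
    (d.insert k v).keys = PySem.Set.add d.keys k := by
  by_cases h : d.contains k
  · rw [PySem.Dict.keys_insert_of_contains d v h,
      PySem.Set.add_of_mem ((PySem.Dict.contains_iff_mem_keys d k).mp h)]
  · have h' : d.contains k = false := by simpa using h
    rw [PySem.Dict.keys_insert_of_not_contains d v h',
      PySem.Set.add_of_not_mem (fun hm => by simp [(PySem.Dict.contains_iff_mem_keys d k).mpr hm] at h')]

-- A's loop body, with the setdefault/alias bookkeeping reduced to two overwrites
theorem pvStepP_eq (nb : PySem.Dict Char (PySem.Dict Char Int)) (p : Char × Char) :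
    pvStepP nb p
      = (nb.insert p.1 (pvMaybeAdd p.2 (nb.getD p.1 PySem.Dict.empty))).insert p.2
          (pvMaybeAdd p.1 ((nb.insert p.1 (pvMaybeAdd p.2 (nb.getD p.1 PySem.Dict.empty))).getD p.2
            PySem.Dict.empty)) := by
  simp only [pvStepP, pvSdIns]

theorem pvStepB_eq (nb : PySem.Dict Char (PySem.Dict Char Int)) (e : (Char × Char) × Int) :
    pvStepB nb e
      = (nb.insert e.1.1 (pvAddC e.2 e.1.2 (nb.getD e.1.1 PySem.Dict.empty))).insert e.1.2
          (pvAddC e.2 e.1.1 ((nb.insert e.1.1 (pvAddC e.2 e.1.2 (nb.getD e.1.1 PySem.Dict.empty))).getD e.1.2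
            PySem.Dict.empty)) := by
  simp only [pvStepB, pvSdIns]

theorem pvStepP_keys (nb : PySem.Dict Char (PySem.Dict Char Int)) (p : Char × Char) :
    (pvStepP nb p).keys = PySem.Set.add (PySem.Set.add nb.keys p.1) p.2 := by
  rw [pvStepP_eq, pvKeysInsertAdd, pvKeysInsertAdd]

theorem pvStepB_keys (nb : PySem.Dict Char (PySem.Dict Char Int)) (e : (Char × Char) × Int) :
    (pvStepB nb e).keys = PySem.Set.add (PySem.Set.add nb.keys e.1.1) e.1.2 := by
  rw [pvStepB_eq, pvKeysInsertAdd, pvKeysInsertAdd]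

theorem pvStepP_getD (nb : PySem.Dict Char (PySem.Dict Char Int)) (p : Char × Char) (k : Char) :
    (pvStepP nb p).getD k PySem.Dict.empty
      = (pvEvs k p).foldl (fun m y => m.insert y (m.getD y 0 + 1)) (nb.getD k PySem.Dict.empty) := by
  obtain ⟨a, b⟩ := p
  rw [pvStepP_eq]
  simp only [pvEvs, pvMaybeAdd_eq]
  by_cases h1 : k = a <;> by_cases h2 : k = b
  · subst h1; subst h2
    by_cases ak : k ∈ pvAlpha <;>
      simp [ak, PySem.Dict.getD_insert_self]
  · subst h1
    by_cases ak : k ∈ pvAlpha <;> by_cases ab : b ∈ pvAlpha <;>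
      simp [ak, ab, PySem.Dict.getD_insert, h2, Ne.symm h2]
  · subst h2
    by_cases ak : k ∈ pvAlpha <;> by_cases aa : a ∈ pvAlpha <;>
      simp [ak, aa, PySem.Dict.getD_insert, h1, Ne.symm h1]
  · by_cases aa : a ∈ pvAlpha <;> by_cases ab : b ∈ pvAlpha <;>
      simp [aa, ab, PySem.Dict.getD_insert, h1, h2, Ne.symm h1, Ne.symm h2]

theorem pvStepB_getD (nb : PySem.Dict Char (PySem.Dict Char Int)) (e : (Char × Char) × Int) (k : Char) :
    (pvStepB nb e).getD k PySem.Dict.empty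
      = ((pvEvs k e.1).map (fun y => (y, e.2))).foldl
          (fun m yc => m.insert yc.1 (m.getD yc.1 0 + yc.2)) (nb.getD k PySem.Dict.empty) := by
  obtain ⟨⟨a, b⟩, c⟩ := e
  rw [pvStepB_eq]
  simp only [pvEvs, pvAddC, List.map_append]
  by_cases h1 : k = a <;> by_cases h2 : k = b
  · subst h1; subst h2
    by_cases ak : k ∈ pvAlpha <;>
      simp [ak, PySem.Dict.getD_insert_self]
  · subst h1
    by_cases ak : k ∈ pvAlpha <;> by_cases ab : b ∈ pvAlpha <;>
      simp [ak, ab, PySem.Dict.getD_insert, h2, Ne.symm h2]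
  · subst h2
    by_cases ak : k ∈ pvAlpha <;> by_cases aa : a ∈ pvAlpha <;>
      simp [ak, aa, PySem.Dict.getD_insert, h1, Ne.symm h1]
  · by_cases aa : a ∈ pvAlpha <;> by_cases ab : b ∈ pvAlpha <;>
      simp [aa, ab, PySem.Dict.getD_insert, h1, h2, Ne.symm h1, Ne.symm h2]

-- A's index loop is the fold of pvStepP over the adjacent pairs
theorem pvFoldA_eq_pairs (t : List Char) (d : PySem.Dict Char (PySem.Dict Char Int)) :
    (PySem.List.pyRange 0 ((t.length : Int) - 1) 1).foldl (pvStepA t) d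
      = ((t.zip (t.drop 1)).foldl pvStepP d) := by
  have key : ∀ (n j : Nat) (d : PySem.Dict Char (PySem.Dict Char Int)), t.length - j ≤ n →
      (PySem.List.pyRange (j : Int) ((t.length : Int) - 1) 1).foldl (pvStepA t) d
        = ((t.drop j).zip (t.drop (j + 1))).foldl pvStepP d := by
    intro n
    induction n with
    | zero =>
      intro j d h
      have hj : t.length ≤ j := by omega
      rw [PySem.List.pyRange_one_eq_nil (by omega), List.drop_eq_nil_of_le hj]
      simp
    | succ n ih =>
      intro j d h
      by_cases hj : (j : Int) < (t.length : Int) - 1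
      · have hjl : j < t.length := by omega
        have hj1 : j + 1 < t.length := by omega
        have hstep : pvStepA t d j = pvStepP d (t[j], t[j + 1]) := by
          unfold pvStepA
          rw [show ((j : Int) + 1) = ((j + 1 : Nat) : Int) by push_cast; ring,
            PySem.List.pyGet?_natCast, PySem.List.pyGet?_natCast,
            List.getElem?_eq_getElem hjl, List.getElem?_eq_getElem hj1]
          rfl
        rw [PySem.List.pyRange_one_cons hj, List.foldl_cons, hstep,
          List.drop_eq_getElem_cons hjl, List.drop_eq_getElem_cons hj1, List.zip_cons_cons,
          List.foldl_cons,
          show ((j : Int) + 1) = ((j + 1 : Nat) : Int) by push_cast; ring,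
          ih (j + 1) _ (by omega), ← List.drop_eq_getElem_cons hj1]
      · have hl : t.length ≤ j + 1 := by omega
        rw [PySem.List.pyRange_one_eq_nil (by omega), List.drop_eq_nil_of_le hl]
        simp
  have h0 := key t.length 0 d (by omega)
  simpa using h0

-- outer keys after folding pvStepP
theorem pvKeysA (P : List (Char × Char)) (d : PySem.Dict Char (PySem.Dict Char Int)) :
    (P.foldl pvStepP d).keys = PySem.Set.update d.keys (P.flatMap (fun p => [p.1, p.2])) := by
  induction P generalizing d with
  | nil => simp [PySem.Set.update_nil]
  | cons p P ih =>
    rw [List.foldl_cons, ih, pvStepP_keys, List.flatMap_cons, PySem.Set.update_append,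
      PySem.Set.update_cons, PySem.Set.update_cons, PySem.Set.update_nil]

-- outer keys after folding pvStepB
theorem pvKeysB (L : List ((Char × Char) × Int)) (d : PySem.Dict Char (PySem.Dict Char Int)) :
    (L.foldl pvStepB d).keys = PySem.Set.update d.keys (L.flatMap (fun e => [e.1.1, e.1.2])) := by
  induction L generalizing d with
  | nil => simp [PySem.Set.update_nil]
  | cons e L ih =>
    rw [List.foldl_cons, ih, pvStepB_keys, List.flatMap_cons, PySem.Set.update_append,
      PySem.Set.update_cons, PySem.Set.update_cons, PySem.Set.update_nil]

-- inner-dict projection of A's fold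
theorem pvInnerA (P : List (Char × Char)) (d : PySem.Dict Char (PySem.Dict Char Int)) (k : Char) :
    (P.foldl pvStepP d).getD k PySem.Dict.empty
      = (P.flatMap (pvEvs k)).foldl (fun m y => m.insert y (m.getD y 0 + 1)) (d.getD k PySem.Dict.empty) := by
  induction P generalizing d with
  | nil => simp
  | cons p P ih =>
    rw [List.foldl_cons, ih, pvStepP_getD, List.flatMap_cons, List.foldl_append]

-- inner-dict projection of B's fold
theorem pvInnerB (L : List ((Char × Char) × Int)) (d : PySem.Dict Char (PySem.Dict Char Int)) (k : Char) :
    (L.foldl pvStepB d).getD k PySem.Dict.empty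
      = (L.flatMap (fun e => (pvEvs k e.1).map (fun y => (y, e.2)))).foldl
          (fun m yc => m.insert yc.1 (m.getD yc.1 0 + yc.2)) (d.getD k PySem.Dict.empty) := by
  induction L generalizing d with
  | nil => simp
  | cons e L ih =>
    rw [List.foldl_cons, ih, pvStepB_getD, List.flatMap_cons, List.foldl_append]

theorem pvGetDFoldC (l : List (Char × Int)) (d : PySem.Dict Char Int) (m : Char) :
    (l.foldl (fun dd yc => dd.insert yc.1 (dd.getD yc.1 0 + yc.2)) d).getD m 0
      = d.getD m 0 + ((l.filter (fun yc => yc.1 = m)).map (fun yc => yc.2)).sum := by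
  induction l generalizing d with
  | nil => simp
  | cons yc l ih =>
    rw [List.foldl_cons, ih, List.filter_cons]
    by_cases h : yc.1 = m
    · simp [h, add_assoc]
    · rw [PySem.Dict.getD_insert]
      simp [h, Ne.symm h]

theorem pvUpdateOfSubset {α : Type} [BEq α] [LawfulBEq α] (s : PySem.Set α) (ys : List α)
    (h : ∀ y ∈ ys, y ∈ s) : PySem.Set.update s ys = s := by
  rw [PySem.Set.update_eq_append_filter]
  have hf : List.filter (fun y => !(PySem.Set.contains s y)) (PySem.Set.ofList ys) = [] := by
    rw [List.filter_eq_nil_iff]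
    intro y hy
    simp
    exact h y ((PySem.Set.mem_ofList ys y).mp hy)
  rw [hf, List.append_nil]

theorem pvDedupFlatMap {α β : Type} [BEq α] [LawfulBEq α] [BEq β] [LawfulBEq β] (P : List α) (g : α → List β) :
    PySem.Set.ofList ((PySem.Set.ofList P).flatMap g) = PySem.Set.ofList (P.flatMap g) := by
  induction P using List.reverseRecOn with
  | nil => simp [PySem.Set.ofList_nil]
  | append_singleton P p ih =>
    by_cases hp : p ∈ P
    · rw [PySem.Set.ofList_append_singleton, PySem.Set.add_of_mem (((PySem.Set.mem_ofList _ _).mpr hp)),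
        ih, List.flatMap_append, PySem.Set.ofList_append]
      refine (pvUpdateOfSubset _ _ ?_).symm
      intro y hy
      rw [PySem.Set.mem_ofList]
      exact List.mem_flatMap.mpr ⟨p, hp, by simpa using hy⟩
    · rw [PySem.Set.ofList_append_singleton,
        PySem.Set.add_of_not_mem (fun hc => hp ((PySem.Set.mem_ofList _ _).mp hc)),
        List.flatMap_append, List.flatMap_append, PySem.Set.ofList_append, PySem.Set.ofList_append, ih]

theorem pvCountFlatMapSum {α : Type} (P : List α) (g : α → List Char) (m : Char) :
    (P.flatMap g).count m = (P.map (fun p => (g p).count m)).sum := by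
  induction P with
  | nil => simp
  | cons p P ih => simp [List.flatMap_cons, List.count_append, ih]

theorem pvCountInst {α : Type} (i1 i2 : BEq α) (h1 : @LawfulBEq α i1) (h2 : @LawfulBEq α i2)
    (x : α) (P : List α) : @List.count α i1 x P = @List.count α i2 x P := by
  induction P with
  | nil => rfl
  | cons p P ih =>
    rw [@List.count_cons α i1, @List.count_cons α i2, ih]
    have e : (@BEq.beq α i1 p x) = (@BEq.beq α i2 p x) := by
      by_cases h : p = x
      · rw [h, (@beq_iff_eq α i1 h1 x x).mpr rfl, (@beq_iff_eq α i2 h2 x x).mpr rfl]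
      · rw [Bool.eq_false_iff.mpr (fun hb => h ((@beq_iff_eq α i1 h1 p x).mp hb)),
          Bool.eq_false_iff.mpr (fun hb => h ((@beq_iff_eq α i2 h2 p x).mp hb))]
    rw [e]

theorem pvCountGroup {α : Type} [BEq α] [LawfulBEq α] (P : List α) (g : α → List Char) (m : Char) :
    ((PySem.Set.ofList P).map (fun p => ((g p).count m : Int) * P.count p)).sum
      = ((P.flatMap g).count m : Int) := by
  haveI : DecidableEq α := fun a b => decidable_of_iff ((a == b) = true) beq_iff_eq
  rw [← List.sum_toFinset _ (PySem.Set.nodup_ofList P)]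
  have hfs : (PySem.Set.ofList P).toFinset = P.toFinset := by
    ext x
    simp [PySem.Set.mem_ofList]
  rw [hfs, pvCountFlatMapSum]
  rw [Nat.cast_list_sum, List.map_map]
  have h2 := Finset.sum_list_map_count P (fun p => ((g p).count m : Int))
  simp only [nsmul_eq_mul] at h2
  have hc : ∀ x, @List.count α instBEqOfDecidableEq x P = List.count x P :=
    fun x => pvCountInst _ _ (by infer_instance) (by infer_instance) x P
  simp only [hc] at h2
  rw [Function.comp_def]
  exact (Finset.sum_congr rfl (fun x _ => mul_comm _ _)).trans h2.symm

theorem pvChunk (ys : List Char) (c : Int) (m : Char) :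
    (((ys.map (fun y => (y, c))).filter (fun yc => yc.1 = m)).map (fun yc => yc.2)).sum
      = (ys.count m : Int) * c := by
  induction ys with
  | nil => simp
  | cons y ys ih =>
    rw [List.map_cons, List.filter_cons]
    by_cases h : y = m
    · subst h
      simp only [decide_true, if_true, List.map_cons, List.sum_cons, List.count_cons_self]
      rw [ih]
      push_cast
      ring
    · simp [h, ih]

theorem pvSumFlat {β : Type} (S : List β) (F : β → List (Char × Int)) (m : Char) :
    (((S.flatMap F).filter (fun yc => yc.1 = m)).map (fun yc => yc.2)).sum
      = (S.map (fun p => (((F p).filter (fun yc => yc.1 = m)).map (fun yc => yc.2)).sum)).sum := by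
  induction S with
  | nil => simp
  | cons p S ih => simp [List.flatMap_cons, List.filter_append, ih]

-- equality of the two inner-dict folds
theorem pvInnerFoldEq (P : List (Char × Char)) (k : Char) :
    (P.flatMap (pvEvs k)).foldl (fun m y => m.insert y (m.getD y 0 + 1)) PySem.Dict.empty
      = (((PySem.Set.ofList P).map (fun p => (p, (P.count p : Int)))).flatMap
            (fun e => (pvEvs k e.1).map (fun y => (y, e.2)))).foldl
          (fun m yc => m.insert yc.1 (m.getD yc.1 0 + yc.2)) PySem.Dict.empty := by
  apply PySem.Dict.ext
  have hkA : ((P.flatMap (pvEvs k)).foldl (fun m y => m.insert y (m.getD y 0 + 1))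
      (PySem.Dict.empty : PySem.Dict Char Int)).keys = PySem.Set.ofList (P.flatMap (pvEvs k)) := by
    rw [PySem.Dict.keys_foldl_insert (f := fun d x => d.getD x 0 + 1), PySem.Dict.keys_empty,
      PySem.Set.update_nil_left]
  have hfst : (((PySem.Set.ofList P).map (fun p => (p, (P.count p : Int)))).flatMap
      (fun e => (pvEvs k e.1).map (fun y => (y, e.2)))).map Prod.fst
      = (PySem.Set.ofList P).flatMap (pvEvs k) := by
    rw [List.map_flatMap, List.flatMap_map]
    simp [Function.comp_def]
  have hkB : ((((PySem.Set.ofList P).map (fun p => (p, (P.count p : Int)))).flatMap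
      (fun e => (pvEvs k e.1).map (fun y => (y, e.2)))).foldl
        (fun m yc => m.insert yc.1 (m.getD yc.1 0 + yc.2)) (PySem.Dict.empty : PySem.Dict Char Int)).keys
      = PySem.Set.ofList (P.flatMap (pvEvs k)) := by
    rw [PySem.Dict.keys_foldl_insert_key _ Prod.fst (fun d yc => d.getD yc.1 0 + yc.2),
      PySem.Dict.keys_empty, PySem.Set.update_nil_left, hfst]
    exact pvDedupFlatMap P (pvEvs k)
  have ndA : ((P.flatMap (pvEvs k)).foldl (fun m y => m.insert y (m.getD y 0 + 1))
      (PySem.Dict.empty : PySem.Dict Char Int)).keys.Nodup := by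
    simp only [hkA]
    exact PySem.Set.nodup_ofList _
  have ndB : ((((PySem.Set.ofList P).map (fun p => (p, (P.count p : Int)))).flatMap
      (fun e => (pvEvs k e.1).map (fun y => (y, e.2)))).foldl
        (fun m yc => m.insert yc.1 (m.getD yc.1 0 + yc.2)) (PySem.Dict.empty : PySem.Dict Char Int)).keys.Nodup := by
    simp only [hkB]
    exact PySem.Set.nodup_ofList _
  rw [PySem.Dict.items_eq_map_keys _ ndA (0 : Int), PySem.Dict.items_eq_map_keys _ ndB (0 : Int),
    hkA, hkB]
  apply List.map_congr_left
  intro m _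
  have hA : ∀ mm, ((P.flatMap (pvEvs k)).foldl (fun m y => m.insert y (m.getD y 0 + 1))
      (PySem.Dict.empty : PySem.Dict Char Int)).getD mm 0 = ((P.flatMap (pvEvs k)).count mm : Int) := by
    intro mm
    rw [PySem.Dict.getD_foldl_insert_add_one, PySem.Dict.getD_empty]
    ring
  have hB : ∀ mm, ((((PySem.Set.ofList P).map (fun p => (p, (P.count p : Int)))).flatMap
      (fun e => (pvEvs k e.1).map (fun y => (y, e.2)))).foldl
        (fun m yc => m.insert yc.1 (m.getD yc.1 0 + yc.2)) (PySem.Dict.empty : PySem.Dict Char Int)).getD mm 0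
      = ((P.flatMap (pvEvs k)).count mm : Int) := by
    intro mm
    rw [pvGetDFoldC, PySem.Dict.getD_empty, List.flatMap_map]
    have := pvSumFlat (PySem.Set.ofList P)
      (fun p => (pvEvs k p).map (fun y => (y, (P.count p : Int)))) mm
    rw [this]
    have hc : ∀ p, ((((pvEvs k p).map (fun y => (y, (P.count p : Int)))).filter
        (fun yc => yc.1 = mm)).map (fun yc => yc.2)).sum
        = ((pvEvs k p).count mm : Int) * (P.count p : Int) := fun p => pvChunk _ _ _
    rw [List.map_congr_left (fun p _ => hc p), pvCountGroup]
    ring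
  rw [hA m, hB m]

-- the two outer folds build the same dict
theorem pvMain (P : List (Char × Char)) :
    P.foldl pvStepP PySem.Dict.empty
      = ((PySem.Set.ofList P).map (fun p => (p, (P.count p : Int)))).foldl pvStepB
          PySem.Dict.empty := by
  apply PySem.Dict.ext
  have hKA : (P.foldl pvStepP
      (PySem.Dict.empty : PySem.Dict Char (PySem.Dict Char Int))).keys
      = PySem.Set.ofList (P.flatMap (fun p => [p.1, p.2])) := by
    rw [pvKeysA, PySem.Dict.keys_empty, PySem.Set.update_nil_left]
  have hKB : (((PySem.Set.ofList P).map (fun p => (p, (P.count p : Int)))).foldl pvStepB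
      (PySem.Dict.empty : PySem.Dict Char (PySem.Dict Char Int))).keys
      = PySem.Set.ofList (P.flatMap (fun p => [p.1, p.2])) := by
    rw [pvKeysB, PySem.Dict.keys_empty, PySem.Set.update_nil_left, List.flatMap_map]
    exact pvDedupFlatMap P _
  have ndA : (P.foldl pvStepP
      (PySem.Dict.empty : PySem.Dict Char (PySem.Dict Char Int))).keys.Nodup := by
    simp only [hKA]
    exact PySem.Set.nodup_ofList _
  have ndB : (((PySem.Set.ofList P).map (fun p => (p, (P.count p : Int)))).foldl pvStepB
      (PySem.Dict.empty : PySem.Dict Char (PySem.Dict Char Int))).keys.Nodup := by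
    simp only [hKB]
    exact PySem.Set.nodup_ofList _
  rw [PySem.Dict.items_eq_map_keys _ ndA PySem.Dict.empty,
    PySem.Dict.items_eq_map_keys _ ndB PySem.Dict.empty, hKA, hKB]
  apply List.map_congr_left
  intro c _
  have gA := pvInnerA P PySem.Dict.empty c
  have gB := pvInnerB ((PySem.Set.ofList P).map (fun p => (p, (P.count p : Int))))
    PySem.Dict.empty c
  rw [PySem.Dict.getD_empty] at gA gB
  rw [gA, gB, ← pvInnerFoldEq P c]

-- ===== VERDICT (by name: the statement is the Claim_ definition above) =====
theorem neighborCount_spec : Claim_equal_neighborCount := by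
  intro text _
  unfold Spec_neighborCount
  simp only [neighborCount, neighborCount_alt]
  rw [pvFoldA_eq_pairs, PySem.Dict.foldl_insert_getD_add_one_eq_counter,
    PySem.Dict.items_counter, pvMain]
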